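-- pv_equiv track=rewrite | github.com/Hidvika/Studentmate | studymate/backend/app/ingestion/chunker.py | _estimate_page_range
-- ===== SOURCE A (Python) =====
-- from typing import List, Tuple
--
-- def _estimate_page_range(start_word: int, end_word: int, total_words: int,
--                        page_texts: List[str] = None) -> Tuple[int, int]:
--     """Estimate page range for a chunk based on word positions."""
--     if not page_texts:
--         return 1, 1
--
--     # Calculate word positions as percentages
--     start_percent = start_word / total_words if total_words > 0 else 0
--     end_percent = end_word / total_words if total_words > 0 else 0
--
--     # Map percentages to page numbers
--     total_pages = len(page_texts)
--     if total_pages == 0: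
--         return 1, 1
--
--     # Calculate word counts per page for more accurate mapping
--     page_word_counts = []
--     for page_text in page_texts:
--         page_words = page_text.split()
--         page_word_counts.append(len(page_words))
--
--     total_page_words = sum(page_word_counts)
--     if total_page_words == 0:
--         return 1, 1
--
--     # Find start page
--     current_word_count = 0
--     start_page = 1
--     for i, page_words in enumerate(page_word_counts):
--         if current_word_count + page_words > start_word:
--             start_page = i + 1
--             break
--         current_word_count += page_words
--     else:
--         start_page = total_pages
--
--     # Find end page
--     current_word_count = 0
--     end_page = 1
--     for i, page_words in enumerate(page_word_counts):
--         if current_word_count + page_words > end_word: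
--             end_page = i + 1
--             break
--         current_word_count += page_words
--     else:
--         end_page = total_pages
--
--     return start_page, end_page
-- ===== SOURCE B (Python) =====
-- def _estimate_page_range(start_word, end_word, total_words, page_texts=None):
--     """Estimate page range for a chunk: prefix sums + binary search instead of two linear scans."""
--     if not page_texts:
--         return 1, 1
--     prefix = []
--     total = 0
--     for page_text in page_texts:
--         total += len(page_text.split())
--         prefix.append(total)
--     if total == 0:
--         return 1, 1
--     n = len(prefix)
--
--     def page_for(w):
--         lo, hi = 0, n
--         while lo < hi:
--             mid = (lo + hi) // 2
--             if prefix[mid] > w: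
--                 hi = mid
--             else:
--                 lo = mid + 1
--         return lo + 1 if lo < n else n
--
--     return page_for(start_word), page_for(end_word)
-- ===== Notes on version B (the rewrite author's own statement) =====
-- stated objective: alternative
-- what changed: Replaces A's two separate linear for/else scans over per-page word counts with a single prefix-sum pass plus a binary search per endpoint (first prefix entry strictly greater than the word index, clamped to the page count).
import Mathlib
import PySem

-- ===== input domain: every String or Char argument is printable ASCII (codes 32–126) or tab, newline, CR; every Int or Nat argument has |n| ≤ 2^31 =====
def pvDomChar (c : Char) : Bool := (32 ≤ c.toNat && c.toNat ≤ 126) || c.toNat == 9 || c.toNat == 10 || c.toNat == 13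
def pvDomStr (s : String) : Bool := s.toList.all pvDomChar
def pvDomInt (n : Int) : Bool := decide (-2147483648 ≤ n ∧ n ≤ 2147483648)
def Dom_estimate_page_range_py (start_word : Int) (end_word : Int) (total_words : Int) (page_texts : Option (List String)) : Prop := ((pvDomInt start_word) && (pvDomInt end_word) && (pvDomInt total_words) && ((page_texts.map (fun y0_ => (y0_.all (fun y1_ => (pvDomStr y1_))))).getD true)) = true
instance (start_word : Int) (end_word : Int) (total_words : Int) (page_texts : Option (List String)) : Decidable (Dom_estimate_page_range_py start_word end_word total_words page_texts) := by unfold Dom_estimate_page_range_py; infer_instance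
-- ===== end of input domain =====

-- B replaces A's two linear scans with one prefix-sum pass plus binary search per endpoint (alternative decomposition; return value proved equal).

-- ===== PORT A =====
-- the for/else search loop of A: first i with cur + counts[i] > w gives i+1, else total_pages
def pvScanPage (counts : List Int) (w : Int) (i : Nat) (cur : Int) (tp : Int) : Int :=
  match counts with
  | [] => tp
  | c :: rest => if cur + c > w then ((i : Int) + 1) else pvScanPage rest w (i + 1) (cur + c) tp

def estimate_page_range_py (start_word : Int) (end_word : Int) (total_words : Int) (page_texts : Option (List String)) : Int × Int :=
  match page_texts with
  | none => (1, 1)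
  | some pts =>
    if pts = [] then (1, 1)   -- `if not page_texts`
    else
      -- start_percent / end_percent are computed in A but never used (dead float code): omitted
      let total_pages : Int := (pts.length : Int)
      if total_pages = 0 then (1, 1)
      else
        let page_word_counts : List Int := pts.map (fun t => ((PySem.Str.split₀ t).length : Int))
        let total_page_words : Int := page_word_counts.foldl (· + ·) 0
        if total_page_words = 0 then (1, 1)
        else
          (pvScanPage page_word_counts start_word 0 0 total_pages,
           pvScanPage page_word_counts end_word 0 0 total_pages)

-- ===== PORT B =====
-- one pass building (prefix sums, running total)
def pvBuildPrefix (texts : List String) (total : Int) : List Int × Int :=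
  match texts with
  | [] => ([], total)
  | t :: rest =>
    let total' := total + ((PySem.Str.split₀ t).length : Int)
    (total' :: (pvBuildPrefix rest total').1, (pvBuildPrefix rest total').2)

-- binary search: first index lo with prefix[lo] > w (lo = n if none); prefix[mid] is always
-- in range (0 ≤ lo ≤ mid < hi ≤ n), so List.getD is exact for Python's prefix[mid]
def pvBSearch (pre : List Int) (w : Int) (lo hi : Nat) : Nat :=
  if h : lo < hi then
    let mid := (lo + hi) / 2
    if pre.getD mid 0 > w then pvBSearch pre w lo mid
    else pvBSearch pre w (mid + 1) hi
  else lo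
termination_by hi - lo
decreasing_by all_goals omega

def pvPageFor (pre : List Int) (n : Nat) (w : Int) : Int :=
  let lo := pvBSearch pre w 0 n
  if lo < n then ((lo : Int) + 1) else (n : Int)

def estimate_page_range_py_alt (start_word : Int) (end_word : Int) (total_words : Int) (page_texts : Option (List String)) : Int × Int :=
  match page_texts with
  | none => (1, 1)
  | some pts =>
    if pts = [] then (1, 1)
    else
      let pr := pvBuildPrefix pts 0
      if pr.2 = 0 then (1, 1)
      else
        let n := pr.1.length
        (pvPageFor pr.1 n start_word, pvPageFor pr.1 n end_word)

-- ===== PRECONDITION & SPEC =====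
def Spec_estimate_page_range_py (start_word : Int) (end_word : Int) (total_words : Int) (page_texts : Option (List String)) (out : Int × Int) : Prop := out = estimate_page_range_py_alt start_word end_word total_words page_texts
instance (start_word : Int) (end_word : Int) (total_words : Int) (page_texts : Option (List String)) (out : Int × Int) : Decidable (Spec_estimate_page_range_py start_word end_word total_words page_texts out) := by unfold Spec_estimate_page_range_py; infer_instance

-- ===== CLAIM (what is proved, stated in full; the proofs are below) =====
def Claim_equal_estimate_page_range_py : Prop := ∀ (start_word : Int) (end_word : Int) (total_words : Int) (page_texts : Option (List String)), Dom_estimate_page_range_py start_word end_word total_words page_texts → Spec_estimate_page_range_py start_word end_word total_words page_texts (estimate_page_range_py start_word end_word total_words page_texts)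

-- ===== LEMMAS AND PROOFS =====

-- the number of leading prefix entries ≤ w
def pvTW (p : List Int) (w : Int) : Nat := (p.takeWhile (fun x => decide (x ≤ w))).length

theorem pvTW_cons_le {a w : Int} {rest : List Int} (ha : a ≤ w) :
    pvTW (a :: rest) w = pvTW rest w + 1 := by
  simp [pvTW, ha]

theorem pvTW_cons_gt {a w : Int} {rest : List Int} (ha : ¬ a ≤ w) :
    pvTW (a :: rest) w = 0 := by
  simp [pvTW, ha]

theorem pvTW_le_length (p : List Int) (w : Int) : pvTW p w ≤ p.length := by
  induction p with
  | nil => simp [pvTW]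
  | cons a rest ih =>
    by_cases ha : a ≤ w
    · rw [pvTW_cons_le ha]; simpa using ih
    · rw [pvTW_cons_gt ha]; simp

theorem pvBuildPrefix_length (texts : List String) (total : Int) :
    (pvBuildPrefix texts total).1.length = texts.length := by
  induction texts generalizing total with
  | nil => rfl
  | cons t rest ih => simp [pvBuildPrefix, ih]

theorem pvFoldlAdd_shift (l : List Int) (a : Int) :
    l.foldl (· + ·) a = a + l.foldl (· + ·) 0 := by
  induction l generalizing a with
  | nil => simp
  | cons x xs ih =>
    simp only [List.foldl_cons]
    rw [ih (a + x), ih (0 + x)]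
    ring

theorem pvBuildPrefix_snd (texts : List String) (total : Int) :
    (pvBuildPrefix texts total).2 =
      total + (texts.map (fun t => ((PySem.Str.split₀ t).length : Int))).foldl (· + ·) 0 := by
  induction texts generalizing total with
  | nil => simp [pvBuildPrefix]
  | cons t rest ih =>
    simp only [pvBuildPrefix, List.map_cons, List.foldl_cons]
    rw [ih]
    rw [pvFoldlAdd_shift _ (0 + ((PySem.Str.split₀ t).length : Int))]
    ring

theorem pvBuildPrefix_lb (texts : List String) (total : Int) :
    ∀ x ∈ (pvBuildPrefix texts total).1, total ≤ x := by
  induction texts generalizing total with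
  | nil => simp [pvBuildPrefix]
  | cons t rest ih =>
    intro x hx
    simp only [pvBuildPrefix, List.mem_cons] at hx
    rcases hx with h | h
    · omega
    · have := ih (total + ((PySem.Str.split₀ t).length : Int)) x h
      omega

theorem pvBuildPrefix_sorted (texts : List String) (total : Int) :
    (pvBuildPrefix texts total).1.Pairwise (· ≤ ·) := by
  induction texts generalizing total with
  | nil => simp [pvBuildPrefix]
  | cons t rest ih =>
    simp only [pvBuildPrefix, List.pairwise_cons]
    refine ⟨fun x hx => ?_, ih _⟩
    have := pvBuildPrefix_lb rest (total + ((PySem.Str.split₀ t).length : Int)) x hx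
    omega

-- indices below pvTW satisfy ≤ w
theorem pvTW_lt (p : List Int) (w : Int) : ∀ k, k < pvTW p w → p.getD k 0 ≤ w := by
  induction p with
  | nil => intro k hk; simp [pvTW] at hk
  | cons a rest ih =>
    intro k hk
    by_cases ha : a ≤ w
    · cases k with
      | zero => simpa using ha
      | succ k =>
        rw [pvTW_cons_le ha] at hk
        exact ih k (by omega)
    · rw [pvTW_cons_gt ha] at hk
      omega

-- with a sorted list, indices with value ≤ w lie below pvTW
theorem pvTW_ge (p : List Int) (w : Int) (hs : p.Pairwise (· ≤ ·)) :
    ∀ k, k < p.length → p.getD k 0 ≤ w → k < pvTW p w := by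
  induction p with
  | nil => intro k hk; simp at hk
  | cons a rest ih =>
    intro k hk hv
    rcases List.pairwise_cons.mp hs with ⟨hhead, htail⟩
    by_cases ha : a ≤ w
    · rw [pvTW_cons_le ha]
      cases k with
      | zero => omega
      | succ k =>
        have : k < pvTW rest w := ih htail k (by simpa using hk) (by simpa using hv)
        omega
    · exfalso
      cases k with
      | zero => simp at hv; omega
      | succ k =>
        have hk' : k < rest.length := by simpa using hk
        have hmem : rest.getD k 0 ∈ rest := by
          rw [List.getD_eq_getElem?_getD, List.getElem?_eq_getElem hk']
          simp [List.getElem_mem]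
        have := hhead _ hmem
        simp only [List.getD_cons_succ] at hv
        omega

theorem pvBSearch_eq (p : List Int) (w : Int) (hs : p.Pairwise (· ≤ ·)) :
    ∀ lo hi, lo ≤ pvTW p w → pvTW p w ≤ hi → hi ≤ p.length → pvBSearch p w lo hi = pvTW p w := by
  intro lo hi
  induction lo, hi using pvBSearch.induct p w with
  | case1 lo hi h mid hgt ih =>
    intro h1 h2 h3
    rw [pvBSearch]
    simp only [dif_pos h]
    have hmid : lo ≤ mid ∧ mid < hi := by constructor <;> omega
    have htw_le : pvTW p w ≤ mid := by
      by_contra hc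
      have := pvTW_lt p w mid (by omega)
      omega
    rw [if_pos (show p.getD ((lo + hi) / 2) 0 > w from hgt)]
    exact ih h1 htw_le (by omega)
  | case2 lo hi h mid hgt ih =>
    intro h1 h2 h3
    rw [pvBSearch]
    simp only [dif_pos h]
    have hmid : lo ≤ mid ∧ mid < hi := by constructor <;> omega
    have hle : p.getD mid 0 ≤ w := by omega
    have : mid < pvTW p w := pvTW_ge p w hs mid (by omega) hle
    rw [if_neg (show ¬ p.getD ((lo + hi) / 2) 0 > w from hgt)]
    exact ih (by omega) h2 h3
  | case3 lo hi h =>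
    intro h1 h2 _
    rw [pvBSearch]
    simp only [dif_neg h]
    omega

-- A's scan equals "takeWhile on the prefix sums"
theorem pvScanPage_eq (texts : List String) (w : Int) :
    ∀ (i : Nat) (cur : Int) (tp : Int),
      pvScanPage (texts.map (fun t => ((PySem.Str.split₀ t).length : Int))) w i cur tp =
        if pvTW (pvBuildPrefix texts cur).1 w < texts.length
        then ((i : Int) + (pvTW (pvBuildPrefix texts cur).1 w : Int) + 1)
        else tp := by
  induction texts with
  | nil => intro i cur tp; simp [pvScanPage, pvBuildPrefix, pvTW]
  | cons t rest ih =>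
    intro i cur tp
    have hpre : (pvBuildPrefix (t :: rest) cur).1 =
        (cur + ((PySem.Str.split₀ t).length : Int)) ::
          (pvBuildPrefix rest (cur + ((PySem.Str.split₀ t).length : Int))).1 := by
      simp [pvBuildPrefix]
    simp only [List.map_cons, pvScanPage, hpre]
    by_cases hgt : cur + ((PySem.Str.split₀ t).length : Int) > w
    · rw [if_pos hgt, pvTW_cons_gt (by omega)]
      simp
    · rw [if_neg hgt, pvTW_cons_le (by omega),
        ih (i + 1) (cur + ((PySem.Str.split₀ t).length : Int)) tp]
      by_cases hc : pvTW (pvBuildPrefix rest (cur + ((PySem.Str.split₀ t).length : Int))).1 w < rest.length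
      · rw [if_pos hc, if_pos (by simpa using Nat.succ_lt_succ hc)]
        push_cast
        ring
      · rw [if_neg hc, if_neg (by simp; omega)]

-- the per-endpoint equality
theorem pvPage_eq (pts : List String) (w : Int) :
    pvScanPage (pts.map (fun t => ((PySem.Str.split₀ t).length : Int))) w 0 0 (pts.length : Int) =
      pvPageFor (pvBuildPrefix pts 0).1 (pvBuildPrefix pts 0).1.length w := by
  have hlen := pvBuildPrefix_length pts 0
  have hsorted := pvBuildPrefix_sorted pts 0
  have htwle := pvTW_le_length (pvBuildPrefix pts 0).1 w
  rw [pvScanPage_eq pts w 0 0 (pts.length : Int)]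
  unfold pvPageFor
  rw [pvBSearch_eq (pvBuildPrefix pts 0).1 w hsorted 0 (pvBuildPrefix pts 0).1.length
      (Nat.zero_le _) htwle (le_refl _)]
  by_cases hc : pvTW (pvBuildPrefix pts 0).1 w < pts.length
  · rw [if_pos hc, if_pos (by omega)]
    simp
  · rw [if_neg hc, if_neg (by omega)]
    omega

-- ===== VERDICT (by name: the statement is the Claim_ definition above) =====
theorem estimate_page_range_py_spec : Claim_equal_estimate_page_range_py := by
  intro start_word end_word total_words page_texts _
  unfold Spec_estimate_page_range_py estimate_page_range_py estimate_page_range_py_alt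
  match page_texts with
  | none => rfl
  | some pts =>
    by_cases hnil : pts = []
    · simp [hnil]
    · simp only [if_neg hnil]
      have hlen0 : ¬ ((pts.length : Int) = 0) := by
        simp only [Int.natCast_eq_zero, List.length_eq_zero_iff]
        exact hnil
      simp only [if_neg hlen0]
      have hsum : (pvBuildPrefix pts 0).2 =
          (pts.map (fun t => ((PySem.Str.split₀ t).length : Int))).foldl (· + ·) 0 := by
        rw [pvBuildPrefix_snd]; omega
      by_cases hz : (pts.map (fun t => ((PySem.Str.split₀ t).length : Int))).foldl (· + ·) 0 = 0
      · rw [if_pos hz, if_pos (by rw [hsum]; exact hz)]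
      · rw [if_neg hz, if_neg (by rw [hsum]; exact hz)]
        rw [pvPage_eq pts start_word, pvPage_eq pts end_word]
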